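-- pv_equiv track=rewrite | github.com/satamanchuk-star/tg-bot | app/services/quiz.py | winners_from_results
-- ===== SOURCE A (Python) =====
-- def winners_from_results(results: dict[int, tuple[str, int]]) -> list[tuple[int, str, int]]:
--     if not results:
--         return []
--     top_points = max(points for _, points in results.values())
--     return [
--         (user_id, name, points)
--         for user_id, (name, points) in results.items()
--         if points == top_points
--     ]
-- ===== SOURCE B (Python) =====
-- def winners_from_results(results: dict[int, tuple[str, int]]) -> list[tuple[int, str, int]]:
--     best_points = 0
--     winners: list[tuple[int, str, int]] = []
--     for user_id, (name, points) in results.items():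
--         if not winners or points > best_points:
--             best_points = points
--             winners = [(user_id, name, points)]
--         elif points == best_points:
--             winners.append((user_id, name, points))
--     return winners
-- ===== Notes on version B (the rewrite author's own statement) =====
-- stated objective: alternative
-- what changed: Replaced the max-then-filter two-pass (max over values, then a comprehension keeping entries with top points) by a single running-best pass that resets the winners list when a strictly larger score appears and appends on ties.
import Mathlib
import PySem

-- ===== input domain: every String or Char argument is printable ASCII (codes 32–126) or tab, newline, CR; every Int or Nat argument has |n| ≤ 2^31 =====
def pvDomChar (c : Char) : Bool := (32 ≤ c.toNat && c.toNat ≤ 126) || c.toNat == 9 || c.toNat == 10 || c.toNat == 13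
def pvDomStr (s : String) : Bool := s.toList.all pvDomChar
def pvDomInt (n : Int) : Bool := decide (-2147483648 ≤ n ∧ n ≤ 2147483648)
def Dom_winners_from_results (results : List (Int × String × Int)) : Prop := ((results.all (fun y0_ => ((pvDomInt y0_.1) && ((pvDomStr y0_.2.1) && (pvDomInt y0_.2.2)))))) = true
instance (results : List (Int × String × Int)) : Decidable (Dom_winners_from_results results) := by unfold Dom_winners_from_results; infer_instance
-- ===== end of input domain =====

-- B replaces A's max-then-filter two-pass by a single running-best pass (alternative decomposition, same cost).

-- ===== PORT A =====
-- Python's max over a nonempty generator: first value, then pairwise max over the rest.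
def winners_from_results (results : List (Int × String × Int)) : List (Int × String × Int) :=
  match results with
  | [] => []
  | (_, _, p) :: rest =>
    let top_points := rest.foldl (fun acc x => max acc x.2.2) p
    results.filter (fun x => x.2.2 == top_points)

-- ===== PORT B =====
def winners_from_results_alt (results : List (Int × String × Int)) : List (Int × String × Int) :=
  (results.foldl
    (fun (st : Int × List (Int × String × Int)) x =>
      if st.2 = [] ∨ x.2.2 > st.1 then (x.2.2, [x])
      else if x.2.2 = st.1 then (st.1, st.2 ++ [x])
      else st)
    (0, [])).2

-- ===== PRECONDITION & SPEC =====
def Spec_winners_from_results (results : List (Int × String × Int)) (out : List (Int × String × Int)) : Prop := out = winners_from_results_alt results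
instance (results : List (Int × String × Int)) (out : List (Int × String × Int)) : Decidable (Spec_winners_from_results results out) := by unfold Spec_winners_from_results; infer_instance

-- ===== CLAIM (what is proved, stated in full; the proofs are below) =====
def Claim_equal_winners_from_results : Prop := ∀ (results : List (Int × String × Int)), Dom_winners_from_results results → Spec_winners_from_results results (winners_from_results results)

-- ===== LEMMAS AND PROOFS =====

-- max of the points of a nonempty list (0 on [], never used there)
def pvM (l : List (Int × String × Int)) : Int :=
  match l with
  | [] => 0
  | y :: r => r.foldl (fun acc x => max acc x.2.2) y.2.2

def pvF (l : List (Int × String × Int)) : List (Int × String × Int) :=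
  l.filter (fun x => x.2.2 == pvM l)

def pvStep (st : Int × List (Int × String × Int)) (x : Int × String × Int) :
    Int × List (Int × String × Int) :=
  if st.2 = [] ∨ x.2.2 > st.1 then (x.2.2, [x])
  else if x.2.2 = st.1 then (st.1, st.2 ++ [x])
  else st

lemma pvfold_le (r : List (Int × String × Int)) (p : Int) :
    p ≤ r.foldl (fun acc x => max acc x.2.2) p := by
  induction r generalizing p with
  | nil => simp
  | cons y t ih =>
    simp only [List.foldl_cons]
    exact le_trans (le_max_left p y.2.2) (ih (max p y.2.2))

lemma pvfold_mem_le (r : List (Int × String × Int)) (p : Int) (y : Int × String × Int)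
    (hy : y ∈ r) : y.2.2 ≤ r.foldl (fun acc x => max acc x.2.2) p := by
  induction r generalizing p with
  | nil => simp at hy
  | cons z t ih =>
    simp only [List.foldl_cons]
    rcases List.mem_cons.1 hy with h | h
    · subst h; exact le_trans (le_max_right p y.2.2) (pvfold_le t _)
    · exact ih _ h

lemma pvfold_attained (r : List (Int × String × Int)) (p : Int) :
    r.foldl (fun acc x => max acc x.2.2) p = p ∨
    ∃ x ∈ r, r.foldl (fun acc x => max acc x.2.2) p = x.2.2 := by
  induction r generalizing p with
  | nil => left; rfl
  | cons z t ih =>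
    simp only [List.foldl_cons]
    rcases ih (max p z.2.2) with h | ⟨x, hx, hh⟩
    · rcases max_cases p z.2.2 with ⟨h1, _⟩ | ⟨h1, _⟩
      · left; rw [h, h1]
      · right; exact ⟨z, List.mem_cons_self .., by rw [h, h1]⟩
    · right; exact ⟨x, List.mem_cons_of_mem _ hx, hh⟩

lemma pvM_mem_le (l : List (Int × String × Int)) (y : Int × String × Int) (hy : y ∈ l) :
    y.2.2 ≤ pvM l := by
  match l with
  | [] => simp at hy
  | z :: r =>
    rcases List.mem_cons.1 hy with h | h
    · subst h; exact pvfold_le r y.2.2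
    · exact pvfold_mem_le r z.2.2 y h

lemma pvM_attained (l : List (Int × String × Int)) (h : l ≠ []) :
    ∃ x ∈ l, x.2.2 = pvM l := by
  match l with
  | [] => exact absurd rfl h
  | z :: r =>
    rcases pvfold_attained r z.2.2 with h1 | ⟨x, hx, hh⟩
    · exact ⟨z, List.mem_cons_self .., h1.symm⟩
    · exact ⟨x, List.mem_cons_of_mem _ hx, hh.symm⟩

lemma pvF_ne_nil (l : List (Int × String × Int)) (h : l ≠ []) : pvF l ≠ [] := by
  obtain ⟨x, hx, hh⟩ := pvM_attained l h
  exact List.ne_nil_of_mem (List.mem_filter.2 ⟨hx, by simp [hh]⟩)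

lemma pvM_append_single (seen : List (Int × String × Int)) (x : Int × String × Int)
    (h : seen ≠ []) : pvM (seen ++ [x]) = max (pvM seen) x.2.2 := by
  match seen with
  | [] => exact absurd rfl h
  | z :: r => simp [pvM, List.foldl_append]

lemma pvLoop (l seen : List (Int × String × Int)) (hne : seen ≠ []) :
    l.foldl pvStep (pvM seen, pvF seen) = (pvM (seen ++ l), pvF (seen ++ l)) := by
  induction l generalizing seen with
  | nil => simp
  | cons x t ih =>
    have hstep : pvStep (pvM seen, pvF seen) x = (pvM (seen ++ [x]), pvF (seen ++ [x])) := by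
      unfold pvStep
      have hM := pvM_append_single seen x hne
      rcases lt_trichotomy (pvM seen) x.2.2 with hlt | heq | hgt
      · rw [if_pos (Or.inr hlt)]
        have hMx : pvM (seen ++ [x]) = x.2.2 := by rw [hM]; exact max_eq_right hlt.le
        have hFx : pvF (seen ++ [x]) = [x] := by
          unfold pvF
          rw [hMx, List.filter_append]
          have : seen.filter (fun y => y.2.2 == x.2.2) = [] := by
            rw [List.filter_eq_nil_iff]
            intro y hy hb
            have := pvM_mem_le seen y hy
            simp only [beq_iff_eq] at hb
            omega
          simp [this]
        rw [hMx, hFx]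
      · rw [if_neg (by simp [pvF_ne_nil seen hne]; omega), if_pos heq.symm]
        have hMx : pvM (seen ++ [x]) = pvM seen := by rw [hM]; exact max_eq_left heq.ge
        have hFx : pvF (seen ++ [x]) = pvF seen ++ [x] := by
          unfold pvF
          rw [hMx, List.filter_append]
          simp [heq.symm]
        rw [hMx, hFx]
      · rw [if_neg (by simp [pvF_ne_nil seen hne]; omega), if_neg (by omega)]
        have hMx : pvM (seen ++ [x]) = pvM seen := by rw [hM]; exact max_eq_left hgt.le
        have hFx : pvF (seen ++ [x]) = pvF seen := by
          unfold pvF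
          rw [hMx, List.filter_append]
          have : [x].filter (fun y => y.2.2 == pvM seen) = [] := by
            simp; omega
          simp [this]
        rw [hMx, hFx]
    rw [List.foldl_cons, hstep, ih (seen ++ [x]) (by simp), List.append_assoc]
    rfl

lemma pvA_eq_F (results : List (Int × String × Int)) :
    winners_from_results results = pvF results := by
  match results with
  | [] => rfl
  | y :: r => rfl

lemma pvB_eq_F (results : List (Int × String × Int)) :
    winners_from_results_alt results = pvF results := by
  match results with
  | [] => rfl
  | y :: r =>
    unfold winners_from_results_alt
    have hstep0 : pvStep (0, []) y = (pvM [y], pvF [y]) := by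
      unfold pvStep pvF
      simp [List.filter, show pvM [y] = y.2.2 from rfl]
    have : ((y :: r).foldl pvStep (0, [])) = (pvM ([y] ++ r), pvF ([y] ++ r)) := by
      rw [List.foldl_cons, hstep0, pvLoop r [y] (by simp)]
    simpa [pvStep] using congrArg Prod.snd this

-- ===== VERDICT (by name: the statement is the Claim_ definition above) =====
theorem winners_from_results_spec : Claim_equal_winners_from_results := by
  intro results _
  unfold Spec_winners_from_results
  rw [pvA_eq_F, pvB_eq_F]
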